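-- pv_equiv track=rewrite | github.com/lukassykora/randomForestRules | randomForestRules/randomForestRules.py | _get_divided_rules
-- ===== SOURCE A (Python) =====
-- def _get_divided_rules(no_dummies_rules: list) -> list:
--     """If more categories from the same attribute is in the rule, more classification rules are derived.
--
--     Parameters
--     ----------
--     no_dummies_rule : list
--         Classification rules with multiple values per attribute.
--
--     Returns
--     -------
--     list
--         Classification rules with a single value per attribute.
--     """
--     divided_rules = []
--     for new_rule in no_dummies_rules:  # new rule
--         part_rule = [{}]
--         for key, value in new_rule.items():  # values of an attribute
--             part_list = []
--             for val in value:  # values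
--                 for part in part_rule:
--                     part_dict = part.copy()  # copy the current part of the rule
--                     if val != "nan":
--                         part_dict[key] = val
--                         part_list.append(part_dict)
--             part_rule = part_list
--         divided_rules += part_rule
--     return divided_rules
-- ===== SOURCE B (Python) =====
-- def _get_divided_rules(no_dummies_rules: list) -> list:
--     """Expand multi-value attribute rules into single-value rules via a
--     recursive Cartesian product over filtered (key, values) pairs."""
--     divided_rules = []
--     for rule in no_dummies_rules:
--         pairs = [(k, [v for v in vs if v != "nan"]) for k, vs in rule.items()]
--         divided_rules.extend(_combos(pairs))
--     return divided_rules
--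
--
-- def _combos(pairs):
--     if not pairs:
--         return [{}]
--     (key, vals), rest = pairs[0], _combos(pairs[1:])
--     return [{key: v, **d} for d in rest for v in vals]
-- ===== Notes on version B (the rewrite author's own statement) =====
-- stated objective: idiomatic
-- what changed: A's triple nested loop that repeatedly copies and grows partial dicts is replaced by a per-rule Cartesian product: filter the 'nan' values once per key, then a simple recursion over the (key, values) pairs builds each complete rule dict directly (first key varying fastest, like A).
import Mathlib
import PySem

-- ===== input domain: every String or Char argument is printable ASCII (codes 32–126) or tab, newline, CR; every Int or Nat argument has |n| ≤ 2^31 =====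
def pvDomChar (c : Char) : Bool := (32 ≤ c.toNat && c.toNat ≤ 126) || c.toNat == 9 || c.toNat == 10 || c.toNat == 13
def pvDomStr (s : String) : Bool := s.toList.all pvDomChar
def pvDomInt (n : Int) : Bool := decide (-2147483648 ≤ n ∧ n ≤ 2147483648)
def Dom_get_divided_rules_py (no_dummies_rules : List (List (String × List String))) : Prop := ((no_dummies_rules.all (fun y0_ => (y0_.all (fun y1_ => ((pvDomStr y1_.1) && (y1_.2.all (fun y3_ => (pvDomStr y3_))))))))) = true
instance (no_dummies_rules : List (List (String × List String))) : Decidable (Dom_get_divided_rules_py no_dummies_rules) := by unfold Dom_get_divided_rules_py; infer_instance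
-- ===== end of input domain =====

-- B replaces A's copy-and-grow triple loop by a per-rule recursive Cartesian product over
-- 'nan'-filtered (key, values) pairs (idiomatic; same output, same order).

-- ===== PORT A =====
-- the inner dicts are Python dicts; they are ported as PySem.Dict and converted to
-- association lists (items) where the rule leaves the function.
def get_divided_rules_py (no_dummies_rules : List (List (String × List String))) : List (List (String × String)) :=
  (no_dummies_rules.foldl (fun divided_rules new_rule =>
    divided_rules ++
      ((new_rule.foldl (fun part_rule kv =>
          kv.2.foldl (fun part_list val =>
            part_rule.foldl (fun pl part =>
              if val ≠ "nan" then pl ++ [part.insert kv.1 val] else pl) part_list)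
            []) ([PySem.Dict.empty] : List (PySem.Dict String String))).map
        (fun d => d.items))) [])

-- ===== PORT B =====
-- _combos from Source B: recursion over the (key, filtered-values) pairs
def pvCombos : List (String × List String) → List (List (String × String))
  | [] => [[]]
  | (key, vals) :: rest =>
      (pvCombos rest).flatMap (fun d => vals.map (fun v => (key, v) :: d))

def get_divided_rules_py_alt (no_dummies_rules : List (List (String × List String))) : List (List (String × String)) :=
  no_dummies_rules.foldl (fun divided_rules rule =>
    divided_rules ++ pvCombos (rule.map (fun kv => (kv.1, kv.2.filter (fun v => v ≠ "nan"))))) []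

-- ===== PRECONDITION & SPEC =====
-- Pre_ excludes rules whose association list has duplicate keys: such lists do not represent
-- any Python dict input (a Python dict's keys are unique), so A's behaviour there is undefined.
def Pre_get_divided_rules_py (no_dummies_rules : List (List (String × List String))) : Prop :=
  ∀ rule ∈ no_dummies_rules, (rule.map Prod.fst).Nodup
instance (no_dummies_rules : List (List (String × List String))) : Decidable (Pre_get_divided_rules_py no_dummies_rules) := by unfold Pre_get_divided_rules_py; infer_instance

def pvWitness_get_divided_rules_py : (List (List (String × List String))) :=
  [[("a", ["x", "nan", "y"]), ("b", ["z"])], [("c", ["nan"])]]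

def Spec_get_divided_rules_py (no_dummies_rules : List (List (String × List String))) (out : List (List (String × String))) : Prop := out = get_divided_rules_py_alt no_dummies_rules
instance (no_dummies_rules : List (List (String × List String))) (out : List (List (String × String))) : Decidable (Spec_get_divided_rules_py no_dummies_rules out) := by unfold Spec_get_divided_rules_py; infer_instance

-- ===== CLAIM (what is proved, stated in full; the proofs are below) =====
def Claim_equal_get_divided_rules_py : Prop := ∀ (no_dummies_rules : List (List (String × List String))), Dom_get_divided_rules_py no_dummies_rules → Pre_get_divided_rules_py no_dummies_rules → Spec_get_divided_rules_py no_dummies_rules (get_divided_rules_py no_dummies_rules)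

-- ===== LEMMAS AND PROOFS =====

-- A's innermost loop: append (part.insert k v) for each part of part_rule, onto acc
theorem pv_inner_loop (init : List (PySem.Dict String String)) (acc : List (PySem.Dict String String))
    (f : PySem.Dict String String → PySem.Dict String String) :
    init.foldl (fun pl part => pl ++ [f part]) acc = acc ++ init.map f := by
  induction init generalizing acc with
  | nil => simp
  | cons d t ih => simp [List.foldl, ih]

-- A's middle loop (over the values of one key) equals flatMap over the filtered values
theorem pv_step_eq (k : String) (vs : List String) (init acc : List (PySem.Dict String String)) :
    vs.foldl (fun part_list val =>
        init.foldl (fun pl part =>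
          if val ≠ "nan" then pl ++ [part.insert k val] else pl) part_list) acc
      = acc ++ (vs.filter (fun v => v ≠ "nan")).flatMap (fun v => init.map (·.insert k v)) := by
  induction vs generalizing acc with
  | nil => simp
  | cons v t ih =>
    by_cases h : v = "nan"
    · subst h
      simpa [List.foldl, List.filter] using ih acc
    · simp only [List.foldl, if_pos (by simpa using h)]
      rw [pv_inner_loop, ih]
      simp [List.filter, h]

-- main invariant: A's fold over the (key, values) pairs, started from any list of dicts whose
-- keys avoid the remaining keys, produces exactly B's combinations appended to each start dict
theorem pv_fold_eq (ps : List (String × List String)) (init : List (PySem.Dict String String))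
    (hnd : (ps.map Prod.fst).Nodup)
    (hfresh : ∀ d ∈ init, ∀ p ∈ ps, d.contains p.1 = false) :
    (ps.foldl (fun part_rule kv =>
        kv.2.foldl (fun part_list val =>
          part_rule.foldl (fun pl part =>
            if val ≠ "nan" then pl ++ [part.insert kv.1 val] else pl) part_list)
          []) init).map (fun d => d.items)
      = (pvCombos (ps.map (fun kv => (kv.1, kv.2.filter (fun v => v ≠ "nan"))))).flatMap
          (fun c => init.map (fun d => d.items ++ c)) := by
  induction ps generalizing init with
  | nil => simp [pvCombos]
  | cons p t ih =>
    obtain ⟨k, vs⟩ := p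
    simp only [List.map] at hnd
    have hk : k ∉ t.map Prod.fst := by simpa using hnd.notMem
    simp only [List.foldl]
    rw [pv_step_eq k vs init []]
    rw [ih _ hnd.of_cons ?fresh]
    case fresh =>
      intro d hd p hp
      simp only [List.nil_append, List.mem_flatMap, List.mem_map] at hd
      obtain ⟨v, hv, e, he, rfl⟩ := hd
      have hne : p.1 ≠ k := fun h => hk (h ▸ List.mem_map_of_mem hp)
      rw [PySem.Dict.contains_insert]
      simp only [beq_eq_false_iff_ne, ne_eq, Bool.or_eq_false_iff]
      exact ⟨by simpa using hne, hfresh e he p (List.mem_cons_of_mem _ hp)⟩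
    -- both sides are flatMaps over pvCombos of the tail
    simp only [List.map_cons, pvCombos, List.nil_append, List.flatMap_assoc,
      List.map_flatMap, List.flatMap_map, List.map_map]
    apply List.flatMap_congr
    intro c hc
    apply List.flatMap_congr
    intro v hv
    apply List.map_congr_left
    intro d hd
    have hfr : d.contains k = false := hfresh d hd (k, vs) (List.mem_cons_self)
    simp only [Function.comp_apply, PySem.Dict.items_insert_of_not_contains d _ hfr]
    simp

-- one rule with unique keys: A's inner computation equals B's pvCombos
theorem pv_rule_eq (rule : List (String × List String)) (hnd : (rule.map Prod.fst).Nodup) :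
    ((rule.foldl (fun part_rule kv =>
        kv.2.foldl (fun part_list val =>
          part_rule.foldl (fun pl part =>
            if val ≠ "nan" then pl ++ [part.insert kv.1 val] else pl) part_list)
          []) ([PySem.Dict.empty] : List (PySem.Dict String String))).map (fun d => d.items))
      = pvCombos (rule.map (fun kv => (kv.1, kv.2.filter (fun v => v ≠ "nan")))) := by
  rw [pv_fold_eq rule _ hnd]
  · simp [PySem.Dict.empty]
  · intro d hd p hp
    simp only [List.mem_singleton] at hd
    subst hd
    rfl

-- ===== VERDICT (by name: the statement is the Claim_ definition above) =====
theorem get_divided_rules_py_spec : Claim_equal_get_divided_rules_py := by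
  intro rules _ hpre
  unfold Spec_get_divided_rules_py get_divided_rules_py get_divided_rules_py_alt
  rw [PySem.List.foldl_append_eq_flatMap, PySem.List.foldl_append_eq_flatMap]
  exact congrArg _ (List.flatMap_congr (fun r hr => pv_rule_eq r (hpre r hr)))
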